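-- pv_equiv track=rewrite | github.com/Pepstee/scafad-r-core | legacy/archive/generated/.aws-sam/build/HelloWorldFunction/cleanup.py | is_duplicate_logic
-- ===== SOURCE A (Python) =====
-- def is_duplicate_logic(full_path, filename):
--     """Identify files with duplicate logic"""
--     duplicate_patterns = [
--         'analyze_telemetry.py',  # Analysis output, not core logic
--         lambda f: f.endswith('_old.py') or f.endswith('_backup.py'),
--         lambda f: f.endswith('_v1.py') or f.endswith('_v2.py'),
--         lambda f: 'duplicate' in f.lower(),
--         lambda f: 'copy' in f.lower() and f.endswith('.py'),
--     ]
--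
--     for pattern in duplicate_patterns:
--         if callable(pattern):
--             if pattern(filename):
--                 return True
--         elif pattern == filename:
--             return True
--
--     return False
-- ===== SOURCE B (Python) =====
-- def is_duplicate_logic(full_path, filename):
--     """Identify files with duplicate logic.
--
--     Staged early-exit decomposition: substring checks first, then a single
--     .py gate, then one rindex-based extraction of the token after the last
--     underscore of the stem, looked up in a token table (replacing the four
--     separate endswith tests).
--     """
--     low = filename.lower()
--     if 'duplicate' in low:
--         return True
--     if not filename.endswith('.py'):
--         return False
--     if filename == 'analyze_telemetry.py' or 'copy' in low:
--         return True
--     stem = filename[:-3]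
--     if '_' not in stem:
--         return False
--     token = stem[stem.rindex('_') + 1:]
--     return token in ('old', 'backup', 'v1', 'v2')
-- ===== Notes on version B (the rewrite author's own statement) =====
-- stated objective: alternative
-- what changed: Replaced the pattern-list-with-callable-dispatch loop by staged early-exit checks: substring test first, a single '.py' gate, then one rindex-based extraction of the token after the stem's last underscore looked up in a token table, which replaces the four separate endswith tests.
import Mathlib
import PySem

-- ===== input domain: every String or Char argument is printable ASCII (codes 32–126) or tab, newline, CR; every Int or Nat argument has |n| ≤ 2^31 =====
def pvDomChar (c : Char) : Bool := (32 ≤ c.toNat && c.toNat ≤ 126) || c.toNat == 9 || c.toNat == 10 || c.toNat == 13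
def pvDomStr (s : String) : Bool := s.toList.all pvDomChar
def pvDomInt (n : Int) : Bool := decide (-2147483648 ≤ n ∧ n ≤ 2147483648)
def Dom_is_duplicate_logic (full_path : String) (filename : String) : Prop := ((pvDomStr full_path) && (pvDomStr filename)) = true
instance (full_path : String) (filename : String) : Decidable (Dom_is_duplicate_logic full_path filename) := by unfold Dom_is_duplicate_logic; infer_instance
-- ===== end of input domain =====

-- B replaces A's pattern list + callable-dispatch loop with staged early-exit
-- checks and a single last-underscore-token table lookup (objective: alternative).


-- ===== PORT A =====
-- A's pattern list mixes a string literal with four lambdas; modelled by a small sum type: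
-- `lit s` is the string entry (not callable, compared with `==`), `fnK` the K-th lambda.
inductive DupPattern where
  | lit : String → DupPattern
  | fn1 : DupPattern
  | fn2 : DupPattern
  | fn3 : DupPattern
  | fn4 : DupPattern
deriving DecidableEq, Repr

-- the body of each lambda, applied to `f` (= filename)
def dupPatternCall (p : DupPattern) (f : String) : Bool :=
  match p with
  | .lit _ => false  -- never called: the loop dispatches on callable first
  | .fn1 => PySem.Str.endswith f "_old.py" || PySem.Str.endswith f "_backup.py"
  | .fn2 => PySem.Str.endswith f "_v1.py" || PySem.Str.endswith f "_v2.py"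
  | .fn3 => PySem.Str.isIn "duplicate" (PySem.Str.lower f)
  | .fn4 => PySem.Str.isIn "copy" (PySem.Str.lower f) && PySem.Str.endswith f ".py"

-- the `for pattern in duplicate_patterns` loop with its early returns
def dupLoop (patterns : List DupPattern) (filename : String) : Bool :=
  match patterns with
  | [] => false
  | p :: rest =>
    match p with
    | .lit s => if s == filename then true else dupLoop rest filename
    | _ => if dupPatternCall p filename then true else dupLoop rest filename

def is_duplicate_logic (_full_path : String) (filename : String) : Bool :=
  dupLoop [.lit "analyze_telemetry.py", .fn1, .fn2, .fn3, .fn4] filename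

-- ===== PORT B =====
-- hand port of `stem[stem.rindex('_') + 1:]`: the characters after the LAST '_'
-- (exact for Python whenever '_' ∈ stem, which is the only case B uses it in)
def lastUnderscoreToken (stem : List Char) : List Char :=
  ((stem.reverse).takeWhile (fun c => c ≠ '_')).reverse

def is_duplicate_logic_alt (_full_path : String) (filename : String) : Bool :=
  let low := PySem.Str.lower filename
  if PySem.Str.isIn "duplicate" low then true
  else if !(PySem.Str.endswith filename ".py") then false
  else if filename == "analyze_telemetry.py" || PySem.Str.isIn "copy" low then true
  else
    -- stem = filename[:-3]
    let stem := filename.toList.take (filename.toList.length - 3)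
    if !(PySem.Chars.isIn "_".toList stem) then false
    else
      let token := lastUnderscoreToken stem
      token == "old".toList || token == "backup".toList ||
      token == "v1".toList || token == "v2".toList

-- ===== PRECONDITION & SPEC =====
def Spec_is_duplicate_logic (full_path : String) (filename : String) (out : Bool) : Prop := out = is_duplicate_logic_alt full_path filename
instance (full_path : String) (filename : String) (out : Bool) : Decidable (Spec_is_duplicate_logic full_path filename out) := by unfold Spec_is_duplicate_logic; infer_instance

-- ===== CLAIM (what is proved, stated in full; the proofs are below) =====
def Claim_equal_is_duplicate_logic : Prop := ∀ (full_path : String) (filename : String), Dom_is_duplicate_logic full_path filename → Spec_is_duplicate_logic full_path filename (is_duplicate_logic full_path filename)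

-- ===== LEMMAS AND PROOFS =====

-- splitting a prefix made of two pieces
theorem prefix_append_split {α : Type} (a b r : List α) :
    (a ++ b) <+: r ↔ a <+: r ∧ b <+: r.drop a.length := by
  constructor
  · rintro ⟨t, rfl⟩
    refine ⟨⟨b ++ t, by simp⟩, ?_⟩
    rw [List.append_assoc, List.drop_left]
    exact ⟨t, rfl⟩
  · rintro ⟨⟨u, rfl⟩, hb⟩
    rw [List.drop_left] at hb
    obtain ⟨v, rfl⟩ := hb
    exact ⟨v, by simp⟩

-- `tok ++ ['_']` is a prefix of `u` iff the '_'-free head of `u` is exactly `tok`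
-- and `u` contains a '_' at all (for `tok` itself '_'-free)
theorem token_prefix_iff (tok : List Char) (h : '_' ∉ tok) (u : List Char) :
    (tok ++ ['_']) <+: u ↔ (u.takeWhile (fun c => c ≠ '_') = tok ∧ '_' ∈ u) := by
  induction tok generalizing u with
  | nil =>
    cases u with
    | nil => simp
    | cons c u' =>
      by_cases hc : c = '_'
      · subst hc
        simp [List.cons_prefix_cons, List.takeWhile]
      · have hc2 : ¬ '_' = c := fun e => hc e.symm
        simp [List.cons_prefix_cons, List.takeWhile, hc, hc2]
  | cons a tok' ih =>
    have ha : a ≠ '_' := fun hh => h (hh ▸ List.mem_cons_self)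
    have h' : '_' ∉ tok' := fun hh => h (List.mem_cons_of_mem _ hh)
    cases u with
    | nil => simp
    | cons c u' =>
      by_cases hc' : c = '_'
      · subst hc'
        simp [List.cons_prefix_cons, List.takeWhile, ha]
      · by_cases hc : c = a
        · subst hc
          have hc2 : ¬ '_' = c := fun e => hc' e.symm
          simp [List.cons_prefix_cons, List.takeWhile, hc', hc2, ih h' u']
        · have h3 : ¬ a = c := fun e => hc e.symm
          simp [List.cons_prefix_cons, List.takeWhile, hc', hc, h3]

-- endswith with a '_tok.py' suffix, phrased on stem = filename[:-3]
theorem endswith_token_iff (tok : List Char) (h : '_' ∉ tok) (f : List Char) :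
    (("_".toList ++ tok ++ ".py".toList) <:+ f) ↔
      (".py".toList <:+ f ∧ '_' ∈ f.take (f.length - 3) ∧
        lastUnderscoreToken (f.take (f.length - 3)) = tok) := by
  have hstem : (f.take (f.length - 3)).reverse = f.reverse.drop 3 := by
    by_cases hl : 3 ≤ f.length
    · rw [List.reverse_take]
      congr 1
      omega
    · have h0 : f.length - 3 = 0 := by omega
      rw [h0]
      simp [List.drop_eq_nil_iff]
      omega
  rw [← List.reverse_prefix, ← List.reverse_prefix (l₁ := ".py".toList)]
  have : ("_".toList ++ tok ++ ".py".toList).reverse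
      = ".py".toList.reverse ++ (tok.reverse ++ ['_']) := by simp
  rw [this, prefix_append_split]
  have hlen : (".py".toList.reverse).length = 3 := by decide
  rw [hlen]
  have hmem : '_' ∈ f.take (f.length - 3) ↔ '_' ∈ f.reverse.drop 3 := by
    rw [← hstem]; simp
  have hnr : '_' ∉ tok.reverse := by simpa using h
  rw [token_prefix_iff tok.reverse hnr (f.reverse.drop 3)]
  constructor
  · rintro ⟨h1, h2, h3⟩
    refine ⟨h1, hmem.mpr h3, ?_⟩
    unfold lastUnderscoreToken
    rw [hstem, h2]; simp
  · rintro ⟨h1, h2, h3⟩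
    refine ⟨h1, ?_, hmem.mp h2⟩
    unfold lastUnderscoreToken at h3
    rw [hstem] at h3
    have := congrArg List.reverse h3
    simpa using this
  
-- characterisations of the concrete endswith tests used by A
theorem endswith_iff_tok (filename : String) (tok : String) (h : '_' ∉ tok.toList)
    (suf : String) (hsuf : suf.toList = "_".toList ++ tok.toList ++ ".py".toList) :
    PySem.Str.endswith filename suf = true ↔
      (PySem.Str.endswith filename ".py" = true ∧
        '_' ∈ filename.toList.take (filename.toList.length - 3) ∧
        lastUnderscoreToken (filename.toList.take (filename.toList.length - 3)) = tok.toList) := by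
  rw [PySem.Str.endswith, PySem.Chars.endswith_iff, hsuf,
      endswith_token_iff tok.toList h filename.toList,
      show PySem.Str.endswith filename ".py" = PySem.Chars.endswith filename.toList ".py".toList from rfl,
      PySem.Chars.endswith_iff]

-- equality with the literal forces the '.py' suffix
theorem analyze_endswith (filename : String) (h : filename = "analyze_telemetry.py") :
    PySem.Str.endswith filename ".py" = true := by subst h; decide

-- ===== VERDICT (by name: the statement is the Claim_ definition above) =====
theorem is_duplicate_logic_spec : Claim_equal_is_duplicate_logic := by
  intro full_path filename _
  unfold Spec_is_duplicate_logic is_duplicate_logic is_duplicate_logic_alt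
  simp only [dupLoop, dupPatternCall]
  rw [Bool.eq_iff_iff]
  have hmem : PySem.Chars.isIn "_".toList (filename.toList.take (filename.toList.length - 3)) = true
      ↔ '_' ∈ filename.toList.take (filename.toList.length - 3) := by
    rw [PySem.Chars.isIn_iff_infix]
    constructor
    · rintro ⟨p, s, hp⟩
      have : '_' ∈ p ++ "_".toList ++ s := by simp
      rw [hp] at this; exact this
    · intro hm
      obtain ⟨p, s, hps⟩ := List.append_of_mem hm
      exact ⟨p, s, by rw [hps]; simp⟩
  have hold := endswith_iff_tok filename "old" (by decide) "_old.py" (by decide)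
  have hbackup := endswith_iff_tok filename "backup" (by decide) "_backup.py" (by decide)
  have hv1 := endswith_iff_tok filename "v1" (by decide) "_v1.py" (by decide)
  have hv2 := endswith_iff_tok filename "v2" (by decide) "_v2.py" (by decide)
  have hana := analyze_endswith filename
  split_ifs with g1 g2 g3 g4 <;>
    simp_all [beq_iff_eq, eq_comm (a := filename)]
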